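-- pv_equiv track=rewrite | github.com/wumin86/DeepSymNet | sr_Transformer_test_artificialData.py | get_perLayerSymList
-- ===== SOURCE A (Python) =====
-- def get_perLayerSymList(predList):
--     symTable = [0x01, 0x02, 0x04, 0x08, 0x10, 0x20, 0x40, 0x80]
--     lenTable = len(symTable)
--     perLayerSymList = []
--     for currCandPredList in (predList):
--         perLayerSymListTmp = []
--         for symNo in (currCandPredList):
--             if 0 == symNo:
--                 continue
--             symList = []
--             for k in range(lenTable):
--                 if 0 < (symNo & symTable[k]):
--                     symList.append(k)
--             perLayerSymListTmp.append(symList)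
--         perLayerSymList.append(perLayerSymListTmp)
--     return perLayerSymList
-- ===== SOURCE B (Python) =====
-- _BITS = [[k for k in range(8) if v >> k & 1] for v in range(256)]
--
-- def get_perLayerSymList(predList):
--     return [[_BITS[symNo & 0xFF] for symNo in layer if symNo != 0]
--             for layer in predList]
-- ===== Notes on version B (the rewrite author's own statement) =====
-- stated objective: faster
-- what changed: B precomputes a 256-entry table mapping each byte value to its list of set-bit positions, so the per-element 8-iteration bit-test loop of A is replaced by a single masked table lookup (symNo & 0xFF), with the traversal written as comprehensions.
import Mathlib
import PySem

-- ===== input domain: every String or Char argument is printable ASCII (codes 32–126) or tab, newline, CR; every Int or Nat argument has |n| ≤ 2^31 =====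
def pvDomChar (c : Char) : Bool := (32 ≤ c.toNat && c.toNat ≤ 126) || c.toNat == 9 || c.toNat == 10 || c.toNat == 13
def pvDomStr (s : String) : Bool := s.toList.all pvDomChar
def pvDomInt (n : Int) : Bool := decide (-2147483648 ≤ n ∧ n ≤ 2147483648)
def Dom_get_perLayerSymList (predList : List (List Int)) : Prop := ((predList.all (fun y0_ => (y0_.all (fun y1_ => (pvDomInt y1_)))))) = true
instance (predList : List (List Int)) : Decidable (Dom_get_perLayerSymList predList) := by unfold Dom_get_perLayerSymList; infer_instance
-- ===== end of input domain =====

-- B replaces A's per-element 8-step bit-test loop by a single lookup in a 256-row table of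
-- precomputed bit-position lists (objective: faster by a constant factor).

-- ===== PORT A =====
-- Python's local symTable (constant) as a helper; symTable[k] is ported with getD (k < 8 always holds).
def pvSymTable : List Int := [0x01, 0x02, 0x04, 0x08, 0x10, 0x20, 0x40, 0x80]

def get_perLayerSymList (predList : List (List Int)) : List (List (List Int)) :=
  predList.foldl
    (fun perLayerSymList currCandPredList =>
      perLayerSymList ++
        [currCandPredList.foldl
          (fun perLayerSymListTmp symNo =>
            if (0 : Int) == symNo then perLayerSymListTmp
            else
              perLayerSymListTmp ++
                [(List.range pvSymTable.length).foldl
                  (fun symList k =>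
                    if 0 < PySem.Int.band symNo (pvSymTable.getD k 0) then symList ++ [(k : Int)]
                    else symList) []])
          []])
    []

-- ===== PORT B =====
-- _BITS = [[k for k in range(8) if v >> k & 1] for v in range(256)]
def pvBitsRow (v : Nat) : List Int :=
  ((List.range 8).filter (fun k => v >>> k &&& 1 == 1)).map (fun k => (k : Int))

def pvBITS : List (List Int) := (List.range 256).map pvBitsRow

-- [[_BITS[symNo & 0xFF] for symNo in layer if symNo != 0] for layer in predList]
-- (the index symNo & 0xFF is always in [0, 256), so the in-range getD is exact)
def get_perLayerSymList_alt (predList : List (List Int)) : List (List (List Int)) :=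
  predList.map (fun layer =>
    (layer.filter (fun symNo => symNo != 0)).map (fun symNo =>
      pvBITS.getD (PySem.Int.band symNo 255).toNat []))

-- ===== PRECONDITION & SPEC =====
def Spec_get_perLayerSymList (predList : List (List Int)) (out : List (List (List Int))) : Prop := out = get_perLayerSymList_alt predList
instance (predList : List (List Int)) (out : List (List (List Int))) : Decidable (Spec_get_perLayerSymList predList out) := by unfold Spec_get_perLayerSymList; infer_instance

-- ===== CLAIM (what is proved, stated in full; the proofs are below) =====
def Claim_equal_get_perLayerSymList : Prop := ∀ (predList : List (List Int)), Dom_get_perLayerSymList predList → Spec_get_perLayerSymList predList (get_perLayerSymList predList)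

-- ===== LEMMAS AND PROOFS =====

-- A's inner bit-test loop, as a named function (proof-side abbreviation of the port's subterm)
def pvInnerA (symNo : Int) : List Int :=
  (List.range pvSymTable.length).foldl
    (fun symList k =>
      if 0 < PySem.Int.band symNo (pvSymTable.getD k 0) then symList ++ [(k : Int)]
      else symList) []

-- low 8 bits only: m &&& c = (m % 256) &&& c for c < 256 (Nat level)
theorem pvNatLandLow (m c : Nat) (hc : c < 256) : m &&& c = (m % 256) &&& c := by
  refine Nat.eq_of_testBit_eq fun j => ?_
  have h256 : (256 : Nat) = 2 ^ 8 := by norm_num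
  by_cases hj : j < 8
  · rw [Nat.testBit_land, Nat.testBit_land, h256, Nat.testBit_mod_two_pow]
    simp [hj]
  · have hcj : c.testBit j = false :=
      Nat.testBit_lt_two_pow (lt_of_lt_of_le hc (by
        calc (256 : Nat) = 2 ^ 8 := by norm_num
          _ ≤ 2 ^ j := Nat.pow_le_pow_right (by norm_num) (by omega)))
    simp [hcj]

theorem pvBandLowNonneg (m : Nat) (c : Int) (hc0 : 0 ≤ c) (hc : c < 256) :
    PySem.Int.band (m : Int) c = PySem.Int.band ((m % 256 : Nat) : Int) c := by
  have hcn : c.toNat < 256 := by omega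
  simp [PySem.Int.band, hc0]
  exact congrArg _ (pvNatLandLow m c.toNat hcn)

theorem pvBandLowNegSucc (m : Nat) (c : Int) (hc0 : 0 ≤ c) (hc : c < 256) :
    PySem.Int.band (Int.negSucc m) c = PySem.Int.band (Int.negSucc (m % 256)) c := by
  have h1 : ¬ (0 ≤ Int.negSucc m) := by exact not_le.mpr (Int.negSucc_lt_zero m)
  have h2 : ¬ (0 ≤ Int.negSucc (m % 256)) := by exact not_le.mpr (Int.negSucc_lt_zero _)
  have hm : (-(Int.negSucc m) - 1).toNat = m := by
    rw [Int.negSucc_eq]; omega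
  have hm' : (-(Int.negSucc (m % 256)) - 1).toNat = m % 256 := by
    rw [Int.negSucc_eq]; omega
  have hcn : c.toNat < 256 := by omega
  simp [PySem.Int.band, h1, h2, hc0]
  have h3 : (((m : Int)) % 256).toNat = m % 256 := by omega
  rw [h3, Nat.land_comm c.toNat (m % 256), ← pvNatLandLow m c.toNat hcn, Nat.land_comm]

-- every table entry lies in [0, 256)
theorem pvSymTable_getD_bound (k : Nat) :
    0 ≤ pvSymTable.getD k 0 ∧ pvSymTable.getD k 0 < 256 := by
  match k with
  | 0 | 1 | 2 | 3 | 4 | 5 | 6 | 7 => decide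
  | n + 8 =>
    have : pvSymTable.getD (n + 8) 0 = 0 := by
      apply List.getD_eq_default
      simp [pvSymTable]
    rw [this]; exact ⟨le_refl 0, by norm_num⟩

-- A's inner loop only looks at symNo through band with table constants
theorem pvInnerA_congr (s t : Int)
    (h : ∀ c : Int, 0 ≤ c → c < 256 → PySem.Int.band s c = PySem.Int.band t c) :
    pvInnerA s = pvInnerA t := by
  unfold pvInnerA
  have hfun : (fun (symList : List Int) (k : Nat) =>
      if 0 < PySem.Int.band s (pvSymTable.getD k 0) then symList ++ [(k : Int)] else symList)
      = (fun (symList : List Int) (k : Nat) =>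
      if 0 < PySem.Int.band t (pvSymTable.getD k 0) then symList ++ [(k : Int)] else symList) := by
    funext symList k
    rw [h _ (pvSymTable_getD_bound k).1 (pvSymTable_getD_bound k).2]
  rw [hfun]

-- exhaustive check of both programs' per-element value over the 512 possible low bytes
set_option maxRecDepth 8192 in
theorem pvByteCaseNonneg : ∀ r, r < 256 →
    pvInnerA ((r : Nat) : Int) = pvBitsRow (PySem.Int.band ((r : Nat) : Int) 255).toNat ∧
    (PySem.Int.band ((r : Nat) : Int) 255).toNat < 256 := by decide

set_option maxRecDepth 8192 in
theorem pvByteCaseNegSucc : ∀ r, r < 256 →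
    pvInnerA (Int.negSucc r) = pvBitsRow (PySem.Int.band (Int.negSucc r) 255).toNat ∧
    (PySem.Int.band (Int.negSucc r) 255).toNat < 256 := by decide

theorem pvBITS_getD (v : Nat) (hv : v < 256) : pvBITS.getD v [] = pvBitsRow v := by
  simp [pvBITS, List.getD, hv]

-- the key per-element fact: A's inner loop equals B's table lookup
theorem pvKey (s : Int) :
    pvInnerA s = pvBITS.getD (PySem.Int.band s 255).toNat [] := by
  by_cases hs : 0 ≤ s
  · have hrep : s = ((s.toNat : Nat) : Int) := by omega
    have hlow : ∀ c : Int, 0 ≤ c → c < 256 →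
        PySem.Int.band s c = PySem.Int.band ((s.toNat % 256 : Nat) : Int) c := by
      intro c hc0 hc
      conv_lhs => rw [hrep]
      exact pvBandLowNonneg s.toNat c hc0 hc
    have h1 := pvByteCaseNonneg (s.toNat % 256) (Nat.mod_lt _ (by norm_num))
    rw [pvInnerA_congr s _ hlow, h1.1, hlow 255 (by norm_num) (by norm_num),
      pvBITS_getD _ h1.2]
  · have hm : s = Int.negSucc ((-s - 1).toNat) := by
      rw [Int.negSucc_eq]; omega
    have hlow : ∀ c : Int, 0 ≤ c → c < 256 →
        PySem.Int.band s c = PySem.Int.band (Int.negSucc ((-s - 1).toNat % 256)) c := by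
      intro c hc0 hc
      conv_lhs => rw [hm]
      exact pvBandLowNegSucc _ c hc0 hc
    have h2 := pvByteCaseNegSucc ((-s - 1).toNat % 256) (Nat.mod_lt _ (by norm_num))
    rw [pvInnerA_congr s _ hlow, h2.1, hlow 255 (by norm_num) (by norm_num),
      pvBITS_getD _ h2.2]

-- 'for x in l: if q(x): continue; out.append(f(x))' compiles to filter-then-map
theorem pvFoldlSkip {α β : Type} (q : α → Bool) (f : α → β) (l : List α) (acc : List β) :
    l.foldl (fun a x => if q x then a else a ++ [f x]) acc
      = acc ++ (l.filter (fun x => !q x)).map f := by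
  induction l generalizing acc with
  | nil => simp
  | cons x xs ih => by_cases h : q x <;> simp [List.foldl, h, ih]

theorem pvFilterEq : (fun s : Int => !((0 : Int) == s)) = (fun s : Int => s != 0) := by
  funext s
  by_cases h : s = 0 <;> simp [h, bne, eq_comm]

theorem pvMainEq (predList : List (List Int)) :
    get_perLayerSymList predList = get_perLayerSymList_alt predList := by
  unfold get_perLayerSymList get_perLayerSymList_alt
  rw [PySem.List.foldl_append_singleton_eq_map]
  simp only [List.nil_append]
  refine List.map_congr_left fun layer _ => ?_
  rw [pvFoldlSkip (fun s : Int => (0 : Int) == s)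
    (fun symNo => (List.range pvSymTable.length).foldl
      (fun symList k =>
        if 0 < PySem.Int.band symNo (pvSymTable.getD k 0) then symList ++ [(k : Int)]
        else symList) []) layer []]
  simp only [List.nil_append, pvFilterEq]
  exact List.map_congr_left fun s _ => pvKey s

-- ===== VERDICT (by name: the statement is the Claim_ definition above) =====
theorem get_perLayerSymList_spec : Claim_equal_get_perLayerSymList := by
  intro predList _
  exact pvMainEq predList
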